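-- pv_equiv track=rewrite | github.com/ildmxGL/codingstudy | level3/28_기지국_설치.py | solution
-- ===== SOURCE A (Python) =====
-- def solution(n, stations, w):
--     answer = 0
--     S = set([i for s in stations for i in range(s - w, s + w + 1) if i > 0 and i < n + 1])
--     """
--     buildings = [i in S for i in range(1, n + 1)]
--
--     width = 2 * w
--     while buildings:
--         building = buildings.pop()
--         if not building:
--             answer += 1
--             buildings = buildings[:-width]
--     """
--     width = 2 * w
--     tmp = 0
--     for i in range(1, n + 1):
--         if i in S:
--             tmp = i
--             continue
--         if i > tmp:
--             answer += 1
--             tmp = i + width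
--     return answer
-- ===== SOURCE B (Python) =====
-- def solution(n, stations, w):
--     # Interval method: clip each station's coverage to [1, n], sweep the
--     # intervals sorted by start, and cover each uncovered gap with
--     # ceil(gap / chunk) stations, chunk = 2*w + 1 (at least 1).
--     chunk = max(2 * w + 1, 1)
--     ivs = []
--     for s in stations:
--         lo, hi = max(s - w, 1), min(s + w, n)
--         if lo <= hi:
--             ivs.append((lo, hi))
--     ivs.sort(key=lambda iv: iv[0])
--     count = 0
--     cur = 0  # everything in [1, cur] is already covered
--     for lo, hi in ivs:
--         if cur + 1 < lo:
--             count += (lo - 1 - cur + chunk - 1) // chunk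
--         cur = max(cur, hi)
--     if cur < n:
--         count += (n - cur + chunk - 1) // chunk
--     return count
-- ===== Notes on version B (the rewrite author's own statement) =====
-- stated objective: faster
-- what changed: Replaces A's materialised covered-cell set plus cell-by-cell scan of 1..n with clipped coverage intervals sorted by start and a sweep that adds ceil(gap/(2w+1)) per uncovered gap.
import Mathlib
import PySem

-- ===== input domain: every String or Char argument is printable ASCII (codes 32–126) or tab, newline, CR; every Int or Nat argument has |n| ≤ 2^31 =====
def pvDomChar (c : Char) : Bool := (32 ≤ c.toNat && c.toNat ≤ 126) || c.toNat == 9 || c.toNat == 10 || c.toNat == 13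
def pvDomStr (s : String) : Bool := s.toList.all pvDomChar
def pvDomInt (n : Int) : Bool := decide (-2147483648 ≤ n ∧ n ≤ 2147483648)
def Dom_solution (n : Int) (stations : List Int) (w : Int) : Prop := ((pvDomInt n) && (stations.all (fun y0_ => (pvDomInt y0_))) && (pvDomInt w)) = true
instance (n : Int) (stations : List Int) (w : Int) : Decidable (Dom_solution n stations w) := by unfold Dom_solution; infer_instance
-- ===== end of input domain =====

-- B replaces A's covered-cell set and cell-by-cell scan of 1..n by a sweep over
-- the clipped coverage intervals sorted by start, adding ceil(gap/(2w+1)) per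
-- uncovered gap (objective: faster; A is O(n + |stations|*w), B is O(|stations| log |stations|)).

-- ===== PORT A =====
def solution (n : Int) (stations : List Int) (w : Int) : Int :=
  let S : PySem.Set Int := PySem.Set.ofList
    (stations.flatMap (fun s =>
      (PySem.List.pyRange (s - w) (s + w + 1) 1).filter
        (fun i => decide (0 < i) && decide (i < n + 1))))
  let width := 2 * w
  let p := (PySem.List.pyRange 1 (n + 1) 1).foldl
    (fun (p : Int × Int) i =>
      if PySem.Set.contains S i then (p.1, i)
      else if p.2 < i then (p.1 + 1, i + width) else p)
    (0, 0)
  p.1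

-- ===== PORT B =====
def solution_alt (n : Int) (stations : List Int) (w : Int) : Int :=
  let chunk := max (2 * w + 1) 1
  let ivs0 := stations.foldl (fun (acc : List (Int × Int)) s =>
      if max (s - w) 1 ≤ min (s + w) n then acc ++ [(max (s - w) 1, min (s + w) n)] else acc) []
  let ivs := PySem.List.sorted ivs0 (fun iv => iv.1) false
  let p := ivs.foldl (fun (p : Int × Int) iv =>
      (if p.2 + 1 < iv.1 then p.1 + PySem.Int.floordiv (iv.1 - 1 - p.2 + chunk - 1) chunk else p.1,
       max p.2 iv.2)) (0, 0)
  if p.2 < n then p.1 + PySem.Int.floordiv (n - p.2 + chunk - 1) chunk else p.1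

-- ===== PRECONDITION & SPEC =====
def Spec_solution (n : Int) (stations : List Int) (w : Int) (out : Int) : Prop := out = solution_alt n stations w
instance (n : Int) (stations : List Int) (w : Int) (out : Int) : Decidable (Spec_solution n stations w out) := by unfold Spec_solution; infer_instance

-- ===== CLAIM (what is proved, stated in full; the proofs are below) =====
def Claim_equal_solution : Prop := ∀ (n : Int) (stations : List Int) (w : Int), Dom_solution n stations w → Spec_solution n stations w (solution n stations w)

-- ===== LEMMAS AND PROOFS =====

/-- The coverage test A's scan performs, as a predicate on cells. -/
def pvCov (stations : List Int) (w : Int) (i : Int) : Bool :=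
  decide (∃ s ∈ stations, s - w ≤ i ∧ i ≤ s + w)

/-- One step of A's scan loop. -/
def pvAstep (w : Int) (cb : Int → Bool) (p : Int × Int) (i : Int) : Int × Int :=
  if cb i then (p.1, i) else if p.2 < i then (p.1 + 1, i + 2 * w) else p

/-- A's scan loop as fuel recursion over consecutive cells starting at `i`. -/
def pvAloop (w : Int) (cb : Int → Bool) : Nat → Int → Int × Int → Int × Int
  | 0, _, p => p
  | m + 1, i, p => pvAloop w cb m (i + 1) (pvAstep w cb p i)

/-- ceil(m / chunk) as B computes it. -/
def pvCeil (chunk m : Int) : Int := PySem.Int.floordiv (m + chunk - 1) chunk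

/-- B's sweep step. -/
def pvBstep (chunk : Int) (p : Int × Int) (iv : Int × Int) : Int × Int :=
  (if p.2 + 1 < iv.1 then p.1 + pvCeil chunk (iv.1 - 1 - p.2) else p.1, max p.2 iv.2)

/-- B's sweep plus the final gap term. -/
def pvBfin (n chunk : Int) (ivs : List (Int × Int)) (c0 cur : Int) : Int :=
  let p := ivs.foldl (pvBstep chunk) (c0, cur)
  if p.2 < n then p.1 + pvCeil chunk (n - p.2) else p.1

lemma pvCeil_zero (chunk : Int) (h : 1 ≤ chunk) : pvCeil chunk 0 = 0 := by
  unfold pvCeil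
  rw [PySem.Int.floordiv_eq_iff_of_pos (by omega)]
  omega

lemma pvCeil_small (chunk m : Int) (h : 1 ≤ chunk) (h1 : 1 ≤ m) (h2 : m ≤ chunk) :
    pvCeil chunk m = 1 := by
  unfold pvCeil
  rw [PySem.Int.floordiv_eq_iff_of_pos (by omega)]
  omega

lemma pvCeil_step (chunk m : Int) (h : 1 ≤ chunk) (_h1 : chunk < m) :
    pvCeil chunk m = pvCeil chunk (m - chunk) + 1 := by
  unfold pvCeil
  rw [PySem.Int.floordiv_eq_ediv_of_pos (by omega), PySem.Int.floordiv_eq_ediv_of_pos (by omega)]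
  have e : m + chunk - 1 = (m - chunk + chunk - 1) + 1 * chunk := by ring
  rw [e, Int.add_mul_ediv_right _ _ (by omega : chunk ≠ 0)]

/-- foldl over a unit-step range is the fuel loop. -/
lemma pvFoldl_eq_aloop (w : Int) (cb : Int → Bool) (b : Int) :
    ∀ (k : Nat) (i : Int) (p : Int × Int), k = (b - i).toNat →
      (PySem.List.pyRange i b 1).foldl (pvAstep w cb) p = pvAloop w cb k i p := by
  intro k
  induction k with
  | zero =>
    intro i p hk
    rw [PySem.List.pyRange_one_eq_nil (by omega)]
    rfl
  | succ m ih =>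
    intro i p hk
    rw [PySem.List.pyRange_one_cons (by omega)]
    simp only [List.foldl_cons]
    rw [ih (i + 1) _ (by omega)]
    rfl

/-- Skip block: cells that are uncovered but at most tmp leave the state unchanged. -/
lemma pvSkip (w : Int) (cb : Int → Bool) :
    ∀ (k r : Nat) (i : Int) (p : Int × Int),
      (∀ j, i ≤ j → j < i + k → cb j = false ∧ j ≤ p.2) →
      pvAloop w cb (k + r) i p = pvAloop w cb r (i + k) p := by
  intro k
  induction k with
  | zero => intro r i p h; simp
  | succ m ih =>
    intro r i p h
    have hi := h i (le_refl i) (by push_cast; omega)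
    rw [Nat.succ_add]
    show pvAloop w cb (m + r) (i + 1) (pvAstep w cb p i) = _
    rw [pvAstep, hi.1]
    rw [if_neg (by simp), if_neg (by omega : ¬ p.2 < i)]
    rw [ih r (i + 1) p (fun j _ h2 => h j (by omega) (by push_cast at h2 ⊢; omega))]
    congr 1
    push_cast
    ring

/-- Covered block: scanning m ≥ 1 covered cells just moves tmp to the last one. -/
lemma pvCovered (w : Int) (cb : Int → Bool) :
    ∀ (m : Nat) (r : Nat) (i : Int) (p : Int × Int), 1 ≤ m →
      (∀ j, i ≤ j → j < i + m → cb j = true) →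
      pvAloop w cb (m + r) i p = pvAloop w cb r (i + m) (p.1, i + m - 1) := by
  intro m
  induction m with
  | zero => intro r i p h; omega
  | succ m ih =>
    intro r i p _ hcb
    have hi := hcb i (le_refl i) (by push_cast; omega)
    rw [Nat.succ_add]
    show pvAloop w cb (m + r) (i + 1) (pvAstep w cb p i) = _
    rw [pvAstep, hi]
    rw [if_pos rfl]
    rcases Nat.eq_zero_or_pos m with hm | hm
    · subst hm
      rw [Nat.zero_add]
      norm_num
    · rw [ih r (i + 1) (p.1, i) hm
        (fun j h1 h2 => hcb j (by omega) (by push_cast at h2 ⊢; omega))]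
      congr 1 <;> [push_cast; congr 1] <;> push_cast <;> ring

/-- Uncovered run: A places ceil(m/chunk) stations on an m-cell uncovered run. -/
lemma pvRun (w : Int) (cb : Int → Bool) :
    ∀ (m : Nat) (r : Nat) (i c0 tmp : Int), (1 ≤ m → tmp < i) →
      (∀ j, i ≤ j → j < i + m → cb j = false) →
      ∃ tmp', pvAloop w cb (m + r) i (c0, tmp) =
        pvAloop w cb r (i + m) (c0 + pvCeil (max (2 * w + 1) 1) (m : Int), tmp') := by
  intro m
  induction m using Nat.strong_induction_on with
  | _ m ih =>
    intro r i c0 tmp htmp hcb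
    rcases Nat.eq_zero_or_pos m with hm | hm
    · subst hm
      refine ⟨tmp, ?_⟩
      rw [Nat.zero_add]
      simp only [Nat.cast_zero]
      rw [pvCeil_zero _ (by omega)]
      norm_num
    · obtain ⟨mm, rfl⟩ : ∃ mm, m = mm + 1 := ⟨m - 1, by omega⟩
      set chunk : Int := max (2 * w + 1) 1 with hchunk
      have hstep : pvAstep w cb (c0, tmp) i = (c0 + 1, i + 2 * w) := by
        rw [pvAstep, hcb i (le_refl i) (by push_cast; omega)]
        rw [if_neg (by simp), if_pos (htmp hm)]
      set k : Nat := min mm (chunk - 1).toNat with hk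
      have hfuel : mm + 1 + r = ((k + ((mm - k) + r)) + 1 : Nat) := by omega
      obtain ⟨tmp', heq⟩ := ih (mm - k) (by omega) r (i + 1 + k) (c0 + 1) (i + 2 * w)
        (fun _ => by omega)
        (fun j hj1 hj2 => hcb j (by omega) (by omega))
      refine ⟨tmp', ?_⟩
      rw [hfuel]
      show pvAloop w cb (k + ((mm - k) + r)) (i + 1) (pvAstep w cb (c0, tmp) i) = _
      rw [hstep]
      rw [pvSkip w cb k ((mm - k) + r) (i + 1) (c0 + 1, i + 2 * w)
        (fun j hj1 hj2 => by
          refine ⟨hcb j (by omega) (by omega), ?_⟩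
          show j ≤ i + 2 * w
          omega)]
      rw [heq]
      have hpos : i + 1 + (k : Int) + ((mm - k : Nat) : Int) = i + ((mm + 1 : Nat) : Int) := by
        push_cast
        omega
      have hcount : c0 + 1 + pvCeil chunk ((mm - k : Nat) : Int)
          = c0 + pvCeil chunk (((mm + 1 : Nat) : Int)) := by
        by_cases hcase : ((mm : Int) + 1) ≤ chunk
        · have hk0 : mm - k = 0 := by omega
          have hc1 : (((mm + 1 : Nat)) : Int) = (mm : Int) + 1 := by push_cast; ring
          rw [hk0, hc1, pvCeil_small _ _ (by omega) (by omega) hcase]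
          simp only [Nat.cast_zero]
          rw [pvCeil_zero _ (by omega)]
          ring
        · have hc1 : ((mm - k : Nat) : Int) = (((mm + 1 : Nat) : Int)) - chunk := by
            omega
          rw [hc1, pvCeil_step chunk (((mm + 1 : Nat)) : Int) (by omega) (by omega)]
          ring
      rw [hpos, hcount]

lemma pvBfin_cons (n chunk : Int) (q : Int × Int) (ivs : List (Int × Int)) (c0 cur : Int) :
    pvBfin n chunk (q :: ivs) c0 cur
      = pvBfin n chunk ivs (pvBstep chunk (c0, cur) q).1 (pvBstep chunk (c0, cur) q).2 := rfl

/-- Main correspondence: A's scan from cell cur+1 equals B's sweep over the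
    remaining intervals, given that coverage beyond cur is their union. -/
lemma pvMain (n w : Int) (cb : Int → Bool) :
    ∀ (ivs : List (Int × Int)) (cur c0 tmp : Int), tmp ≤ cur →
      (∀ q ∈ ivs, q.1 ≤ q.2 ∧ q.2 ≤ n) →
      ivs.Pairwise (fun a b => a.1 ≤ b.1) →
      (∀ i, cur < i → i ≤ n → (cb i = true ↔ ∃ q ∈ ivs, q.1 ≤ i ∧ i ≤ q.2)) →
      (pvAloop w cb ((n - cur).toNat) (cur + 1) (c0, tmp)).1 =
        pvBfin n (max (2 * w + 1) 1) ivs c0 cur := by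
  intro ivs
  induction ivs with
  | nil =>
    intro cur c0 tmp htmp hbounds hpw hcov
    by_cases hn : n ≤ cur
    · have h0 : (n - cur).toNat = 0 := by omega
      rw [h0]
      show c0 = pvBfin n (max (2 * w + 1) 1) [] c0 cur
      rw [pvBfin]
      simp only [List.foldl_nil]
      rw [if_neg (by omega)]
    · obtain ⟨tmp', heq⟩ := pvRun w cb ((n - cur).toNat) 0 (cur + 1) c0 tmp
        (fun _ => by omega)
        (fun j hj1 hj2 => by
          cases hcj : cb j with
          | false => rfl
          | true =>
            exfalso
            obtain ⟨q, hq, _, _⟩ := (hcov j (by omega) (by omega)).mp hcj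
            exact absurd hq (List.not_mem_nil))
      simp only [Nat.add_zero] at heq
      rw [heq]
      show c0 + pvCeil (max (2 * w + 1) 1) (((n - cur).toNat : Nat) : Int) = _
      rw [pvBfin]
      simp only [List.foldl_nil]
      rw [if_pos (by omega)]
      congr 1
      congr 1
      omega
  | cons q rest ih =>
    intro cur c0 tmp htmp hbounds hpw hcov
    obtain ⟨lo, hi⟩ := q
    have hqb : lo ≤ hi ∧ hi ≤ n := hbounds (lo, hi) (by simp)
    have hrb : ∀ q ∈ rest, q.1 ≤ q.2 ∧ q.2 ≤ n :=
      fun q hq => hbounds q (List.mem_cons_of_mem _ hq)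
    rw [List.pairwise_cons] at hpw
    have htrans : ∀ cur', cur ≤ cur' → hi ≤ cur' → ∀ i, cur' < i → i ≤ n →
        (cb i = true ↔ ∃ q ∈ rest, q.1 ≤ i ∧ i ≤ q.2) := by
      intro cur' hcc hhc i hi1 hi2
      rw [hcov i (by omega) hi2]
      constructor
      · rintro ⟨q, hq, hq1, hq2⟩
        rcases List.mem_cons.mp hq with h | h
        · exfalso
          rw [h] at hq2
          simp only at hq2
          omega
        · exact ⟨q, h, hq1, hq2⟩
      · rintro ⟨q, hq, hq1, hq2⟩
        exact ⟨q, List.mem_cons_of_mem _ hq, hq1, hq2⟩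
    by_cases h1 : hi ≤ cur
    · -- interval entirely behind the sweep line: B skips it, A never sees it
      have hstep : pvBstep (max (2 * w + 1) 1) (c0, cur) (lo, hi) = (c0, cur) := by
        simp only [pvBstep]
        rw [if_neg (by omega), (max_eq_left (show hi ≤ cur by omega) : max cur hi = cur)]
      rw [pvBfin_cons, hstep]
      exact ih cur c0 tmp htmp hrb hpw.2 (htrans cur (le_refl cur) h1)
    · by_cases h2 : lo ≤ cur + 1
      · -- interval touches the sweep line: a covered block (cur, hi]
        have hstep : pvBstep (max (2 * w + 1) 1) (c0, cur) (lo, hi) = (c0, hi) := by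
          simp only [pvBstep]
          rw [if_neg (by omega), (max_eq_right (show cur ≤ hi by omega) : max cur hi = hi)]
        have hsplit : (n - cur).toNat = (hi - cur).toNat + (n - hi).toNat := by omega
        rw [hsplit]
        rw [pvCovered w cb ((hi - cur).toNat) ((n - hi).toNat) (cur + 1) (c0, tmp)
          (by omega)
          (fun j hj1 hj2 => (hcov j (by omega) (by omega)).mpr
            ⟨(lo, hi), by simp, show lo ≤ j by omega, show j ≤ hi by omega⟩)]
        have hp1 : cur + 1 + (((hi - cur).toNat : Nat) : Int) = hi + 1 := by omega
        rw [hp1, show hi + 1 - 1 = hi by ring, pvBfin_cons, hstep]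
        exact ih hi c0 hi (le_refl hi) hrb hpw.2 (htrans hi (by omega) (le_refl hi))
      · -- a gap (cur, lo) then the covered block [lo, hi]
        have hstep : pvBstep (max (2 * w + 1) 1) (c0, cur) (lo, hi)
            = (c0 + pvCeil (max (2 * w + 1) 1) (lo - 1 - cur), hi) := by
          simp only [pvBstep]
          rw [if_pos (by omega), (max_eq_right (show cur ≤ hi by omega) : max cur hi = hi)]
        have hsplit : (n - cur).toNat
            = (lo - 1 - cur).toNat + ((hi - lo + 1).toNat + (n - hi).toNat) := by omega
        rw [hsplit]
        obtain ⟨tmp', heq⟩ := pvRun w cb ((lo - 1 - cur).toNat)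
          ((hi - lo + 1).toNat + (n - hi).toNat) (cur + 1) c0 tmp
          (fun _ => by omega)
          (fun j hj1 hj2 => by
            cases hcj : cb j with
            | false => rfl
            | true =>
              exfalso
              obtain ⟨q, hq, hq1, hq2⟩ := (hcov j (by omega) (by omega)).mp hcj
              have : lo ≤ q.1 := by
                rcases List.mem_cons.mp hq with h | h
                · rw [h]
                · exact hpw.1 q h
              omega)
        rw [heq]
        have hp : cur + 1 + (((lo - 1 - cur).toNat : Nat) : Int) = lo := by omega
        rw [hp]
        rw [pvCovered w cb ((hi - lo + 1).toNat) ((n - hi).toNat) lo _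
          (by omega)
          (fun j hj1 hj2 => (hcov j (by omega) (by omega)).mpr
            ⟨(lo, hi), by simp, show lo ≤ j by omega, show j ≤ hi by omega⟩)]
        have hp2 : lo + (((hi - lo + 1).toNat : Nat) : Int) = hi + 1 := by omega
        have hc : (((lo - 1 - cur).toNat : Nat) : Int) = lo - 1 - cur := by omega
        rw [hp2, show hi + 1 - 1 = hi by ring, hc, pvBfin_cons, hstep]
        exact ih hi (c0 + pvCeil (max (2 * w + 1) 1) (lo - 1 - cur)) hi (le_refl hi)
          hrb hpw.2 (htrans hi (by omega) (le_refl hi))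

-- ===== VERDICT (by name: the statement is the Claim_ definition above) =====
theorem solution_spec : Claim_equal_solution := by
  unfold Claim_equal_solution Spec_solution
  intro n stations w _
  -- A's set of covered cells, and B's clipped-interval list
  have hA : solution n stations w
      = ((PySem.List.pyRange 1 (n + 1) 1).foldl (pvAstep w (fun i =>
          PySem.Set.contains (PySem.Set.ofList (stations.flatMap (fun s =>
            (PySem.List.pyRange (s - w) (s + w + 1) 1).filter
              (fun i => decide (0 < i) && decide (i < n + 1))))) i)) (0, 0)).1 := rfl
  have hB : solution_alt n stations w
      = pvBfin n (max (2 * w + 1) 1)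
          (PySem.List.sorted (stations.foldl (fun (acc : List (Int × Int)) s =>
            if max (s - w) 1 ≤ min (s + w) n then acc ++ [(max (s - w) 1, min (s + w) n)] else acc) [])
            (fun iv => iv.1) false) 0 0 := rfl
  -- A's membership test agrees with pvCov on the scanned window
  have hmem : ∀ i : Int, 1 ≤ i → i < n + 1 →
      PySem.Set.contains (PySem.Set.ofList (stations.flatMap (fun s =>
        (PySem.List.pyRange (s - w) (s + w + 1) 1).filter
          (fun i => decide (0 < i) && decide (i < n + 1))))) i = pvCov stations w i := by
    intro i hi1 hi2
    rw [Bool.eq_iff_iff, PySem.Set.contains_iff, PySem.Set.mem_ofList, pvCov]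
    simp only [List.mem_flatMap, List.mem_filter, PySem.List.mem_pyRange_one,
      Bool.and_eq_true, decide_eq_true_eq]
    constructor
    · rintro ⟨s, hs, ⟨h3, h4⟩, _, _⟩
      exact ⟨s, hs, by omega, by omega⟩
    · rintro ⟨s, hs, h3, h4⟩
      exact ⟨s, hs, ⟨by omega, by omega⟩, by omega, by omega⟩
  -- B's interval list, characterised
  have hivs : stations.foldl (fun (acc : List (Int × Int)) s =>
        if max (s - w) 1 ≤ min (s + w) n then acc ++ [(max (s - w) 1, min (s + w) n)] else acc) []
      = (stations.filter (fun s => decide (max (s - w) 1 ≤ min (s + w) n))).map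
          (fun s => (max (s - w) 1, min (s + w) n)) := by
    rw [show (fun (acc : List (Int × Int)) s =>
          if max (s - w) 1 ≤ min (s + w) n then acc ++ [(max (s - w) 1, min (s + w) n)] else acc)
        = (fun (acc : List (Int × Int)) s =>
          if (fun s => decide (max (s - w) 1 ≤ min (s + w) n)) s = true
          then acc ++ [(fun s => (max (s - w) 1, min (s + w) n)) s] else acc) from by
      funext acc s
      simp]
    rw [PySem.List.foldl_append_if]
    simp
  have hmemivs : ∀ q, q ∈ PySem.List.sorted (stations.foldl (fun (acc : List (Int × Int)) s =>
        if max (s - w) 1 ≤ min (s + w) n then acc ++ [(max (s - w) 1, min (s + w) n)] else acc) [])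
        (fun iv => iv.1) false ↔
      ∃ s ∈ stations, max (s - w) 1 ≤ min (s + w) n ∧ q = (max (s - w) 1, min (s + w) n) := by
    intro q
    rw [PySem.List.mem_sorted, hivs]
    simp only [List.mem_map, List.mem_filter, decide_eq_true_eq]
    constructor
    · rintro ⟨s, ⟨hs, hc⟩, rfl⟩
      exact ⟨s, hs, hc, rfl⟩
    · rintro ⟨s, hs, hc, rfl⟩
      exact ⟨s, ⟨hs, hc⟩, rfl⟩
  rw [hA, hB]
  rw [PySem.List.foldl_congr_mem _ _
    (pvAstep w (pvCov stations w)) _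
    (fun p i hi => by
      rw [PySem.List.mem_pyRange_one] at hi
      rw [pvAstep, pvAstep, hmem i (by omega) (by omega)])]
  rw [pvFoldl_eq_aloop w (pvCov stations w) (n + 1) ((n - 0).toNat) 1 (0, 0) (by omega)]
  apply pvMain n w (pvCov stations w) _ 0 0 0 (le_refl 0)
  · intro q hq
    obtain ⟨s, _, hc, rfl⟩ := (hmemivs q).mp hq
    constructor
    · exact hc
    · exact min_le_right _ _
  · exact PySem.List.sorted_pairwise _ _
  · intro i hi1 hi2
    rw [pvCov]
    simp only [decide_eq_true_eq]
    constructor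
    · rintro ⟨s, hs, h3, h4⟩
      refine ⟨(max (s - w) 1, min (s + w) n), (hmemivs _).mpr ⟨s, hs, by omega, rfl⟩, ?_, ?_⟩
      · show max (s - w) 1 ≤ i
        omega
      · show i ≤ min (s + w) n
        omega
    · rintro ⟨q, hq, hq1, hq2⟩
      obtain ⟨s, hs, hc, rfl⟩ := (hmemivs q).mp hq
      simp only at hq1 hq2
      exact ⟨s, hs, by omega, by omega⟩
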